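-- pv_equiv track=rewrite | github.com/chaoticJester/CS_01418112 | elab/Lab-Final/02.py | father
-- ===== SOURCE A (Python) =====
-- def father(str):
--     count = 0
--     vowel = 0
--     for ch in str:
--         if ch in ['a','e','i','o','u']:
--             vowel += 1
--         if vowel == 2:
--             break
--         count += 1
--     if vowel == 2:
--         tmp = str[:count]
--         return tmp
--     else:
--         return str
-- ===== SOURCE B (Python) =====
-- def father(str):
--     # Total vowels first; then binary search for the longest prefix holding
--     # at most one vowel (vowel count of a prefix is monotone in its length).
--     def vc(s):
--         return sum(ch in 'aeiou' for ch in s)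
--     if vc(str) < 2:
--         return str
--     lo, hi = 0, len(str)
--     while lo < hi:
--         mid = (lo + hi + 1) // 2
--         if vc(str[:mid]) <= 1:
--             lo = mid
--         else:
--             hi = mid - 1
--     return str[:lo]
-- ===== Notes on version B (the rewrite author's own statement) =====
-- stated objective: alternative
-- what changed: Replaces A's single counting scan with early break by counting the string's total vowels once and then binary-searching the longest prefix containing at most one vowel (prefix vowel count is monotone in prefix length).
import Mathlib
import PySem

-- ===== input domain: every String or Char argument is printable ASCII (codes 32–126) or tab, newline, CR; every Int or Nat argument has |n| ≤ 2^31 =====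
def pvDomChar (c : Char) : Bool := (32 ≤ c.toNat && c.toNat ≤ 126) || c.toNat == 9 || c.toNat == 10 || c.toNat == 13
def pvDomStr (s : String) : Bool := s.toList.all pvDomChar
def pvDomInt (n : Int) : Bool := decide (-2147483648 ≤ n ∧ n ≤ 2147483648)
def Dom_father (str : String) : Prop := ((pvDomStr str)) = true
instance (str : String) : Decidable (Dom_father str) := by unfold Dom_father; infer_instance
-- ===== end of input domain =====

-- B replaces A's counting scan with early break by a different algorithm: count the
-- vowels of the whole string once, then binary-search the longest prefix with at most
-- one vowel (prefix vowel count is monotone). Same return value on every input.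

-- ===== PORT A =====
-- the for-loop of A: state (count, vowel), break when vowel hits 2
def fatherLoop : List Char → Nat → Nat → Nat × Nat
  | [], count, vowel => (count, vowel)
  | ch :: rest, count, vowel =>
    let vowel' := if ch ∈ ['a','e','i','o','u'] then vowel + 1 else vowel
    if vowel' = 2 then (count, vowel')
    else fatherLoop rest (count + 1) vowel'

def father (str : String) : String :=
  let r := fatherLoop str.toList 0 0
  if r.2 = 2 then String.ofList (PySem.List.slice str.toList none (some (r.1 : Int)))
  else str

-- ===== PORT B =====
-- vc(s) = sum(ch in 'aeiou' for ch in s): a sum of 0/1 terms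
def vcB (cs : List Char) : Int :=
  (cs.map (fun ch => if ch ∈ "aeiou".toList then (1 : Int) else 0)).sum

-- the while-loop of B; lo, hi are Python ints that stay in 0..len(s), so Nat with
-- Nat division is exact for (lo + hi + 1) // 2; str[:mid] with 0 ≤ mid is List.take
def bsLoop (cs : List Char) (lo hi : Nat) : Nat :=
  if h : lo < hi then
    let mid := (lo + hi + 1) / 2
    if vcB (cs.take mid) ≤ 1 then bsLoop cs mid hi
    else bsLoop cs lo (mid - 1)
  else lo
termination_by hi - lo
decreasing_by all_goals omega

def father_alt (str : String) : String :=
  if vcB str.toList < 2 then str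
  else
    let lo := bsLoop str.toList 0 str.toList.length
    String.ofList (PySem.List.slice str.toList none (some (lo : Int)))

-- ===== PRECONDITION & SPEC =====
def Spec_father (str : String) (out : String) : Prop := out = father_alt str
instance (str : String) (out : String) : Decidable (Spec_father str out) := by unfold Spec_father; infer_instance

-- ===== CLAIM (what is proved, stated in full; the proofs are below) =====
def Claim_equal_father : Prop := ∀ (str : String), Dom_father str → Spec_father str (father str)

-- ===== LEMMAS AND PROOFS =====

-- vowel test and vowel-position table (proof-only definitions)
def pV (c : Char) : Bool := decide (c ∈ ['a','e','i','o','u'])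

def posN : List Char → Nat → List Nat
  | [], _ => []
  | c :: cs, n => if c ∈ ['a','e','i','o','u'] then n :: posN cs (n + 1) else posN cs (n + 1)

lemma posN_ge (cs : List Char) (n : Nat) : ∀ x ∈ posN cs n, n ≤ x := by
  induction cs generalizing n with
  | nil => simp [posN]
  | cons c cs ih =>
    by_cases hv : c ∈ ['a','e','i','o','u']
    · rw [show posN (c :: cs) n = n :: posN cs (n + 1) from by simp only [posN, if_pos hv]]
      intro x hx
      rcases List.mem_cons.mp hx with rfl | hx
      · exact le_refl _
      · exact Nat.le_of_succ_le (ih (n + 1) x hx)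
    · rw [show posN (c :: cs) n = posN cs (n + 1) from by simp only [posN, if_neg hv]]
      intro x hx
      exact Nat.le_of_succ_le (ih (n + 1) x hx)

lemma posN_lt (cs : List Char) (n : Nat) : ∀ x ∈ posN cs n, x < n + cs.length := by
  induction cs generalizing n with
  | nil => simp [posN]
  | cons c cs ih =>
    by_cases hv : c ∈ ['a','e','i','o','u']
    · rw [show posN (c :: cs) n = n :: posN cs (n + 1) from by simp only [posN, if_pos hv]]
      intro x hx
      rcases List.mem_cons.mp hx with rfl | hx
      · simp
      · have := ih (n + 1) x hx; simp at this ⊢; omega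
    · rw [show posN (c :: cs) n = posN cs (n + 1) from by simp only [posN, if_neg hv]]
      intro x hx
      have := ih (n + 1) x hx; simp at this ⊢; omega

lemma posN_pairwise (cs : List Char) (n : Nat) : (posN cs n).Pairwise (· < ·) := by
  induction cs generalizing n with
  | nil => simp [posN]
  | cons c cs ih =>
    by_cases hv : c ∈ ['a','e','i','o','u']
    · rw [show posN (c :: cs) n = n :: posN cs (n + 1) from by simp only [posN, if_pos hv]]
      exact List.Pairwise.cons (fun x hx => Nat.lt_of_succ_le (posN_ge cs (n + 1) x hx)) (ih (n + 1))
    · rw [show posN (c :: cs) n = posN cs (n + 1) from by simp only [posN, if_neg hv]]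
      exact ih (n + 1)

-- prefix vowel count = number of recorded positions below the cut
lemma countP_take (cs : List Char) (n m : Nat) :
    ((cs.take m).countP pV : Int) = (((posN cs n).filter (fun k => decide (k < n + m))).length : Int) := by
  induction cs generalizing n m with
  | nil => simp [posN]
  | cons c cs ih =>
    cases m with
    | zero =>
      rw [List.filter_eq_nil_iff.mpr (fun x hx => by
        have := posN_ge (c :: cs) n x hx; simp; omega)]
      simp
    | succ m =>
      have hc : (c :: cs).take (m + 1) = c :: cs.take m := rfl
      have harith : ∀ k, (k < n + 1 + m) = (k < n + (m + 1)) := by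
        intro k; rw [eq_iff_iff]; omega
      have ihm := ih (n + 1) m
      simp only [harith] at ihm
      by_cases hv : c ∈ ['a','e','i','o','u']
      · have hcond : decide (n < n + (m + 1)) = true := by simp
        rw [hc, List.countP_cons,
          show posN (c :: cs) n = n :: posN cs (n + 1) from by simp only [posN, if_pos hv],
          List.filter_cons, if_pos hcond]
        have hpc : pV c = true := by simp [pV, hv]
        rw [hpc]
        simp only [List.length_cons]
        push_cast
        omega
      · rw [hc, List.countP_cons,
          show posN (c :: cs) n = posN cs (n + 1) from by simp only [posN, if_neg hv]]
        have hpc : pV c = false := by simp [pV, hv]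
        rw [hpc]
        simp only [Bool.false_eq_true, if_false, Nat.add_zero]
        exact ihm

lemma vcB_eq (cs : List Char) : vcB cs = (cs.countP pV : Int) := by
  unfold vcB
  have hs : "aeiou".toList = ['a','e','i','o','u'] := by decide
  rw [hs]
  induction cs with
  | nil => simp
  | cons c cs ih =>
    simp only [List.map_cons, List.sum_cons, List.countP_cons, ih, pV]
    by_cases hv : c ∈ ['a','e','i','o','u'] <;> simp [hv] <;> omega

lemma countP_whole (cs : List Char) (n : Nat) : cs.countP pV = (posN cs n).length := by
  induction cs generalizing n with
  | nil => simp [posN]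
  | cons c cs ih =>
    by_cases hv : c ∈ ['a','e','i','o','u'] <;>
      simp [posN, hv, pV, ih (n + 1)]

-- the monotone predicate: a prefix has at most one vowel exactly when it stops at or
-- before the second vowel position q
lemma pred_iff (cs : List Char) (p q : Nat) (t : List Nat) (h : posN cs 0 = p :: q :: t) :
    ∀ m : Nat, (vcB (cs.take m) ≤ 1 ↔ m ≤ q) := by
  intro m
  have hpw := posN_pairwise cs 0
  rw [h] at hpw
  have hpq : p < q := (List.pairwise_cons.mp hpw).1 q (by simp)
  have ht : ∀ x ∈ t, q < x :=
    (List.pairwise_cons.mp (List.pairwise_cons.mp hpw).2).1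
  rw [vcB_eq, countP_take cs 0 m, h, List.filter_cons, List.filter_cons]
  by_cases hq : q < m
  · rw [if_pos (by simp; omega), if_pos (by simp; omega)]
    simp only [List.length_cons]
    constructor
    · intro hle; push_cast at hle; omega
    · intro hle; omega
  · have htf : t.filter (fun k => decide (k < 0 + m)) = [] :=
      List.filter_eq_nil_iff.mpr (fun x hx => by have := ht x hx; simp; omega)
    by_cases hp : p < m
    · rw [if_pos (by simp; omega), if_neg (by simp; omega), htf]
      simp; omega
    · rw [if_neg (by simp; omega), if_neg (by simp; omega), htf]
      simp; omega

lemma bsLoop_eq (cs : List Char) (q : Nat)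
    (hP : ∀ m : Nat, (vcB (cs.take m) ≤ 1 ↔ m ≤ q)) :
    ∀ k lo hi, hi - lo = k → lo ≤ q → q ≤ hi → bsLoop cs lo hi = q := by
  intro k
  induction k using Nat.strong_induction_on with
  | _ k ih =>
    intro lo hi hk h1 h2
    rw [bsLoop]
    by_cases h : lo < hi
    · rw [dif_pos h]
      have hmid1 : lo < (lo + hi + 1) / 2 := by omega
      have hmid2 : (lo + hi + 1) / 2 ≤ hi := by omega
      by_cases hc : vcB (cs.take ((lo + hi + 1) / 2)) ≤ 1
      · simp only [if_pos hc]
        exact ih (hi - (lo + hi + 1) / 2) (by omega) _ _ rfl ((hP _).mp hc) h2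
      · simp only [if_neg hc]
        have : ¬ ((lo + hi + 1) / 2 ≤ q) := fun hle => hc ((hP _).mpr hle)
        exact ih ((lo + hi + 1) / 2 - 1 - lo) (by omega) _ _ rfl h1 (by omega)
    · rw [dif_neg h]; omega

-- characterisation of A's loop (running counter with early break)
lemma loopA_one (cs : List Char) (n : Nat) :
    fatherLoop cs n 1 =
      match posN cs n with
      | [] => (n + cs.length, 1)
      | p :: _ => (p, 2) := by
  induction cs generalizing n with
  | nil => simp [fatherLoop, posN]
  | cons c cs ih =>
    by_cases hv : c ∈ ['a','e','i','o','u']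
    · simp [fatherLoop, posN, hv]
    · simp only [fatherLoop, posN, hv, ite_false]
      rw [if_neg (by decide)]
      rw [ih]
      cases posN cs (n + 1) <;> first
      | (simp; omega)
      | simp

lemma loopA_zero (cs : List Char) (n : Nat) :
    fatherLoop cs n 0 =
      match posN cs n with
      | [] => (n + cs.length, 0)
      | [_] => (n + cs.length, 1)
      | _ :: q :: _ => (q, 2) := by
  induction cs generalizing n with
  | nil => simp [fatherLoop, posN]
  | cons c cs ih =>
    by_cases hv : c ∈ ['a','e','i','o','u']
    · simp only [fatherLoop, posN, hv, ite_true]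
      rw [if_neg (by decide)]
      rw [loopA_one]
      cases posN cs (n + 1) <;> first
      | (simp; omega)
      | simp
    · simp only [fatherLoop, posN, hv, ite_false]
      rw [if_neg (by decide)]
      rw [ih]
      rcases posN cs (n + 1) with _ | ⟨p, _ | ⟨q, t⟩⟩ <;> first
      | (simp; omega)
      | simp

-- ===== VERDICT (by name: the statement is the Claim_ definition above) =====
theorem father_spec : Claim_equal_father := by
  intro str _
  show father str = father_alt str
  unfold father father_alt
  have hA := loopA_zero str.toList 0
  have hvc := vcB_eq str.toList
  have hwhole := countP_whole str.toList 0
  rcases h : posN str.toList 0 with _ | ⟨p, _ | ⟨q, t⟩⟩ <;> rw [h] at hA hwhole <;> rw [hA]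
  · rw [if_neg (by simp), if_pos (by rw [hvc, hwhole]; simp)]
  · rw [if_neg (by simp), if_pos (by rw [hvc, hwhole]; simp)]
  · have hq : q < str.toList.length := by
      have := posN_lt str.toList 0 q (by rw [h]; simp)
      omega
    have hbs : bsLoop str.toList 0 str.toList.length = q :=
      bsLoop_eq str.toList q (pred_iff str.toList p q t h) _ 0 _ rfl (by omega) (by omega)
    rw [if_pos (by simp), if_neg (by rw [hvc, hwhole]; simp only [List.length_cons]; push_cast; omega)]
    simp only [hbs]
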